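-- pv_equiv track=rewrite | github.com/kanebenjamin/raid_boss | raid_boss/boss.py | get_attack_hint
-- ===== SOURCE A (Python) =====
-- def get_attack_hint(num_list):
--     result = []
--     CHANNEL_TEXT = "The boss is channeling energy!  "
--     ATTACK_TEXT = "The boss is amassing armies!  "
--     HEAL_TEXT = "The boss is about to heal!  "
--     CHANNEL_LIST = [0, 1, 3, 7, 9]
--     ATTACK_LIST = [2, 4, 5, 6, 8]
--     HEAL_LIST = [10]
--     for num in num_list:
--         if num in CHANNEL_LIST:
--             if CHANNEL_TEXT not in result:
--                 result.append(CHANNEL_TEXT)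
--         if num in ATTACK_LIST:
--             if ATTACK_TEXT not in result:
--                 result.append(ATTACK_TEXT)
--         if num in HEAL_LIST:
--             if HEAL_TEXT not in result:
--                 result.append(HEAL_TEXT)
--     return " ".join(result) + "\n"
-- ===== SOURCE B (Python) =====
-- def get_attack_hint(num_list):
--     CAT = {0: 'C', 1: 'C', 3: 'C', 7: 'C', 9: 'C',
--            2: 'A', 4: 'A', 5: 'A', 6: 'A', 8: 'A',
--            10: 'H'}
--     TEXT = {'C': "The boss is channeling energy!  ",
--             'A': "The boss is amassing armies!  ",
--             'H': "The boss is about to heal!  "}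
--     first = {}
--     for i, num in enumerate(num_list):
--         cat = CAT.get(num)
--         if cat is not None and cat not in first:
--             first[cat] = i
--     cats = sorted(first, key=lambda c: first[c])
--     return " ".join(TEXT[c] for c in cats) + "\n"
-- ===== Notes on version B (the rewrite author's own statement) =====
-- stated objective: alternative
-- what changed: B replaces A's streaming text-dedup loop (three list-membership tests plus a 'text not in result' scan per element) by one table pass recording each category's first-occurrence index in a dict keyed by a number-to-category lookup, then sorts the present categories by that index and joins their texts.
import Mathlib
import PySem

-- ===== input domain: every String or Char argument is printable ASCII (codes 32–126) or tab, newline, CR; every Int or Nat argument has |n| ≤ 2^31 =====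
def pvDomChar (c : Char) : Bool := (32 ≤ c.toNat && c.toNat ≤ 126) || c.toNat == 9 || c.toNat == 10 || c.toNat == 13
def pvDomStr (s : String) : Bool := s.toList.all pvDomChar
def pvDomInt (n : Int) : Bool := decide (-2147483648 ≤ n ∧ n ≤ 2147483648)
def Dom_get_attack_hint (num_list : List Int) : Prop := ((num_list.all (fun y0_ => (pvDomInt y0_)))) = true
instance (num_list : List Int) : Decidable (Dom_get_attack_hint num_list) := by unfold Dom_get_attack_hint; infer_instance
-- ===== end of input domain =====

-- B rebuilds the hint from a category table (number → category, first-occurrence index) plus a sort,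
-- instead of A's streaming dedup loop; alternative decomposition, same O(n) cost.

-- ===== PORT A =====
def get_attack_hint (num_list : List Int) : String :=
  let CHANNEL_TEXT := "The boss is channeling energy!  "
  let ATTACK_TEXT := "The boss is amassing armies!  "
  let HEAL_TEXT := "The boss is about to heal!  "
  let CHANNEL_LIST : List Int := [0, 1, 3, 7, 9]
  let ATTACK_LIST : List Int := [2, 4, 5, 6, 8]
  let HEAL_LIST : List Int := [10]
  let result := num_list.foldl (fun result num =>
    let result := if num ∈ CHANNEL_LIST then
        (if CHANNEL_TEXT ∈ result then result else result ++ [CHANNEL_TEXT]) else result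
    let result := if num ∈ ATTACK_LIST then
        (if ATTACK_TEXT ∈ result then result else result ++ [ATTACK_TEXT]) else result
    let result := if num ∈ HEAL_LIST then
        (if HEAL_TEXT ∈ result then result else result ++ [HEAL_TEXT]) else result
    result) []
  PySem.Str.join " " result ++ "\n"

-- ===== PORT B =====
def get_attack_hint_alt (num_list : List Int) : String :=
  let CAT : PySem.Dict Int Char := PySem.Dict.ofList
    [(0, 'C'), (1, 'C'), (3, 'C'), (7, 'C'), (9, 'C'),
     (2, 'A'), (4, 'A'), (5, 'A'), (6, 'A'), (8, 'A'),
     (10, 'H')]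
  let TEXT : PySem.Dict Char String := PySem.Dict.ofList
    [('C', "The boss is channeling energy!  "),
     ('A', "The boss is amassing armies!  "),
     ('H', "The boss is about to heal!  ")]
  let first : PySem.Dict Char Int :=
    (PySem.List.enumerate num_list).foldl (fun first p =>
      match CAT.get? p.2 with          -- cat = CAT.get(num)
      | some cat => if first.contains cat then first else first.insert cat p.1
      | none => first) PySem.Dict.empty
  let cats := PySem.List.sorted first.keys (fun c => first.getD c 0) false
  -- TEXT[c]: c is always a key of TEXT here, so the default "" is never produced (exact)
  PySem.Str.join " " (cats.map (fun c => TEXT.getD c "")) ++ "\n"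

-- ===== PRECONDITION & SPEC =====
def Spec_get_attack_hint (num_list : List Int) (out : String) : Prop := out = get_attack_hint_alt num_list
instance (num_list : List Int) (out : String) : Decidable (Spec_get_attack_hint num_list out) := by unfold Spec_get_attack_hint; infer_instance

-- ===== CLAIM (what is proved, stated in full; the proofs are below) =====
def Claim_equal_get_attack_hint : Prop := ∀ (num_list : List Int), Dom_get_attack_hint num_list → Spec_get_attack_hint num_list (get_attack_hint num_list)

-- ===== LEMMAS AND PROOFS =====

-- A's loop body, named (definitionally the fold step of the port of A)
def pvStepA (result : List String) (num : Int) : List String :=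
  let result := if num ∈ ([0, 1, 3, 7, 9] : List Int) then
      (if "The boss is channeling energy!  " ∈ result then result
       else result ++ ["The boss is channeling energy!  "]) else result
  let result := if num ∈ ([2, 4, 5, 6, 8] : List Int) then
      (if "The boss is amassing armies!  " ∈ result then result
       else result ++ ["The boss is amassing armies!  "]) else result
  let result := if num ∈ ([10] : List Int) then
      (if "The boss is about to heal!  " ∈ result then result
       else result ++ ["The boss is about to heal!  "]) else result
  result

def pvCAT : PySem.Dict Int Char := PySem.Dict.ofList
  [(0, 'C'), (1, 'C'), (3, 'C'), (7, 'C'), (9, 'C'),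
   (2, 'A'), (4, 'A'), (5, 'A'), (6, 'A'), (8, 'A'),
   (10, 'H')]

def pvTextOf (c : Char) : String :=
  (PySem.Dict.ofList
    [('C', "The boss is channeling energy!  "),
     ('A', "The boss is amassing armies!  "),
     ('H', "The boss is about to heal!  ")]).getD c ""

def pvStepB (first : PySem.Dict Char Int) (p : Int × Int) : PySem.Dict Char Int :=
  match pvCAT.get? p.2 with
  | some cat => if first.contains cat then first else first.insert cat p.1
  | none => first

theorem pvA_eq (num_list : List Int) :
    get_attack_hint num_list =
      PySem.Str.join " " (num_list.foldl pvStepA []) ++ "\n" := rfl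

theorem pvB_eq (num_list : List Int) :
    get_attack_hint_alt num_list =
      (let first := (PySem.List.enumerate num_list).foldl pvStepB PySem.Dict.empty
       PySem.Str.join " " ((PySem.List.sorted first.keys (fun c => first.getD c 0) false).map pvTextOf) ++ "\n") := rfl

theorem pvCAT_none {num : Int}
    (h1 : num ∉ ([0, 1, 3, 7, 9] : List Int))
    (h2 : num ∉ ([2, 4, 5, 6, 8] : List Int))
    (h3 : num ∉ ([10] : List Int)) :
    pvCAT.get? num = none := by
  simp only [List.mem_cons, List.not_mem_nil, or_false, not_or] at h1 h2 h3
  obtain ⟨a0, a1, a3, a7, a9⟩ := h1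
  obtain ⟨b2, b4, b5, b6, b8⟩ := h2
  have hmk : pvCAT = PySem.Dict.mk
      [(0, 'C'), (1, 'C'), (3, 'C'), (7, 'C'), (9, 'C'),
       (2, 'A'), (4, 'A'), (5, 'A'), (6, 'A'), (8, 'A'),
       (10, 'H')] := by decide
  rw [hmk]
  simp [PySem.Dict.get?, beq_iff_eq,
    Ne.symm a0, Ne.symm a1, Ne.symm a3, Ne.symm a7, Ne.symm a9,
    Ne.symm b2, Ne.symm b4, Ne.symm b5, Ne.symm b6, Ne.symm b8, Ne.symm h3]

-- the loop invariant: A's accumulator is the text of B's dict's keys, in insertion order;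
-- keys are among 'C','A','H'; recorded indices are strictly increasing and below the next index
def pvInv (res : List String) (d : PySem.Dict Char Int) (i : Int) : Prop :=
  d.keys.Nodup ∧
  (∀ p ∈ d.items, p.1 ∈ (['C', 'A', 'H'] : List Char)) ∧
  d.items.Pairwise (fun p q => p.2 < q.2) ∧
  (∀ p ∈ d.items, p.2 < i) ∧
  res = d.items.map (fun p => pvTextOf p.1)

theorem pvMem_res_iff {res : List String} {d : PySem.Dict Char Int} {i : Int}
    (h : pvInv res d i) (c : Char) (hc : c ∈ (['C', 'A', 'H'] : List Char)) :
    pvTextOf c ∈ res ↔ d.contains c = true := by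
  obtain ⟨hnd, hkeys, _, _, hres⟩ := h
  rw [hres, PySem.Dict.contains_iff_mem_keys]
  constructor
  · intro hm
    simp only [List.mem_map] at hm
    obtain ⟨p, hp, hpc⟩ := hm
    have hk := hkeys p hp
    simp only [List.mem_cons, List.not_mem_nil, or_false] at hk
    have hpc1 : p.1 = c := by
      rcases hk with h | h | h <;> rw [h] at hpc ⊢ <;> fin_cases hc <;>
        first | rfl | (exfalso; exact absurd hpc (by decide))
    rw [← hpc1]
    exact PySem.Dict.mem_keys_of_mem_items d hp
  · intro hm
    simp only [PySem.Dict.keys, List.mem_map] at hm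
    obtain ⟨p, hp, hpc⟩ := hm
    exact List.mem_map.mpr ⟨p, hp, by rw [hpc]⟩

theorem pvStep_inv {res : List String} {d : PySem.Dict Char Int} {i : Int}
    (h : pvInv res d i) (num : Int) :
    pvInv (pvStepA res num) (pvStepB d (i, num)) (i + 1) := by
  obtain ⟨hnd, hkeys, hpair, hbnd, hres⟩ := h
  by_cases hC : num ∈ ([0, 1, 3, 7, 9] : List Int)
  case pos =>
    have hcat : pvCAT.get? num = some 'C' := by fin_cases hC <;> decide
    have hA : num ∉ ([2, 4, 5, 6, 8] : List Int) := by fin_cases hC <;> decide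
    have hH : num ∉ ([10] : List Int) := by fin_cases hC <;> decide
    have hmem := pvMem_res_iff ⟨hnd, hkeys, hpair, hbnd, hres⟩ 'C' (by decide)
    simp only [pvStepA, pvStepB, hcat, if_pos hC, if_neg hA, if_neg hH]
    by_cases hct : d.contains 'C' = true
    case pos =>
      rw [if_pos ((show pvTextOf 'C' = "The boss is channeling energy!  " from rfl) ▸ hmem.mpr hct), if_pos hct]
      exact ⟨hnd, hkeys, hpair, fun p hp => lt_trans (hbnd p hp) (by omega), hres⟩
    case neg =>
      have hct' : d.contains 'C' = false := by simpa using hct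
      rw [if_neg (fun hx => hct ((hmem.mp ((show pvTextOf 'C' = "The boss is channeling energy!  " from rfl) ▸ hx)))), if_neg (by simp [hct'])]
      have hit := PySem.Dict.items_insert_of_not_contains (d := d) (v := i) hct'
      refine ⟨?_, ?_, ?_, ?_, ?_⟩
      · exact PySem.Dict.nodup_keys_insert d 'C' i hnd
      · intro p hp
        rw [hit] at hp
        rcases List.mem_append.mp hp with h' | h'
        · exact hkeys p h'
        · simp at h'; subst h'; simp
      · rw [hit]
        refine List.pairwise_append.mpr ⟨hpair, List.pairwise_singleton _ _, ?_⟩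
        intro p hp q hq
        simp at hq; subst hq
        exact hbnd p hp
      · intro p hp
        rw [hit] at hp
        rcases List.mem_append.mp hp with h' | h'
        · exact lt_trans (hbnd p h') (by omega)
        · simp at h'; subst h'; omega
      · rw [hit, List.map_append, hres]; rfl
  case neg =>
  by_cases hA : num ∈ ([2, 4, 5, 6, 8] : List Int)
  case pos =>
    have hcat : pvCAT.get? num = some 'A' := by fin_cases hA <;> decide
    have hH : num ∉ ([10] : List Int) := by fin_cases hA <;> decide
    have hmem := pvMem_res_iff ⟨hnd, hkeys, hpair, hbnd, hres⟩ 'A' (by decide)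
    simp only [pvStepA, pvStepB, hcat, if_pos hA, if_neg hC, if_neg hH]
    by_cases hct : d.contains 'A' = true
    case pos =>
      rw [if_pos ((show pvTextOf 'A' = "The boss is amassing armies!  " from rfl) ▸ hmem.mpr hct), if_pos hct]
      exact ⟨hnd, hkeys, hpair, fun p hp => lt_trans (hbnd p hp) (by omega), hres⟩
    case neg =>
      have hct' : d.contains 'A' = false := by simpa using hct
      rw [if_neg (fun hx => hct ((hmem.mp ((show pvTextOf 'A' = "The boss is amassing armies!  " from rfl) ▸ hx)))), if_neg (by simp [hct'])]
      have hit := PySem.Dict.items_insert_of_not_contains (d := d) (v := i) hct'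
      refine ⟨?_, ?_, ?_, ?_, ?_⟩
      · exact PySem.Dict.nodup_keys_insert d 'A' i hnd
      · intro p hp
        rw [hit] at hp
        rcases List.mem_append.mp hp with h' | h'
        · exact hkeys p h'
        · simp at h'; subst h'; simp
      · rw [hit]
        refine List.pairwise_append.mpr ⟨hpair, List.pairwise_singleton _ _, ?_⟩
        intro p hp q hq
        simp at hq; subst hq
        exact hbnd p hp
      · intro p hp
        rw [hit] at hp
        rcases List.mem_append.mp hp with h' | h'
        · exact lt_trans (hbnd p h') (by omega)
        · simp at h'; subst h'; omega
      · rw [hit, List.map_append, hres]; rfl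
  case neg =>
  by_cases hH : num ∈ ([10] : List Int)
  case pos =>
    have hcat : pvCAT.get? num = some 'H' := by fin_cases hH <;> decide
    have hmem := pvMem_res_iff ⟨hnd, hkeys, hpair, hbnd, hres⟩ 'H' (by decide)
    simp only [pvStepA, pvStepB, hcat, if_pos hH, if_neg hC, if_neg hA]
    by_cases hct : d.contains 'H' = true
    case pos =>
      rw [if_pos ((show pvTextOf 'H' = "The boss is about to heal!  " from rfl) ▸ hmem.mpr hct), if_pos hct]
      exact ⟨hnd, hkeys, hpair, fun p hp => lt_trans (hbnd p hp) (by omega), hres⟩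
    case neg =>
      have hct' : d.contains 'H' = false := by simpa using hct
      rw [if_neg (fun hx => hct ((hmem.mp ((show pvTextOf 'H' = "The boss is about to heal!  " from rfl) ▸ hx)))), if_neg (by simp [hct'])]
      have hit := PySem.Dict.items_insert_of_not_contains (d := d) (v := i) hct'
      refine ⟨?_, ?_, ?_, ?_, ?_⟩
      · exact PySem.Dict.nodup_keys_insert d 'H' i hnd
      · intro p hp
        rw [hit] at hp
        rcases List.mem_append.mp hp with h' | h'
        · exact hkeys p h'
        · simp at h'; subst h'; simp
      · rw [hit]
        refine List.pairwise_append.mpr ⟨hpair, List.pairwise_singleton _ _, ?_⟩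
        intro p hp q hq
        simp at hq; subst hq
        exact hbnd p hp
      · intro p hp
        rw [hit] at hp
        rcases List.mem_append.mp hp with h' | h'
        · exact lt_trans (hbnd p h') (by omega)
        · simp at h'; subst h'; omega
      · rw [hit, List.map_append, hres]; rfl
  case neg =>
    have hcat : pvCAT.get? num = none := pvCAT_none hC hA hH
    simp only [pvStepA, pvStepB, hcat, if_neg hC, if_neg hA, if_neg hH]
    exact ⟨hnd, hkeys, hpair, fun p hp => lt_trans (hbnd p hp) (by omega), hres⟩

theorem pvLoop_inv : ∀ (l : List Int) (res : List String) (d : PySem.Dict Char Int) (i : Int),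
    pvInv res d i →
    pvInv (l.foldl pvStepA res) ((PySem.List.enumerate l i).foldl pvStepB d) (i + l.length) := by
  intro l
  induction l with
  | nil => intro res d i h; simpa using h
  | cons x xs ih =>
    intro res d i h
    rw [PySem.List.enumerate_cons]
    have := ih (pvStepA res x) (pvStepB d (i, x)) (i + 1) (pvStep_inv h x)
    simpa [List.foldl_cons, add_assoc, add_comm, add_left_comm] using this

theorem pvSorted_keys {d : PySem.Dict Char Int} {i : Int} {res : List String}
    (h : pvInv res d i) :
    PySem.List.sorted d.keys (fun c => d.getD c 0) false = d.keys := by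
  obtain ⟨hnd, _, hpair, _, _⟩ := h
  apply PySem.List.sorted_eq_self_of_pairwise
  have : d.items.Pairwise (fun p q => d.getD p.1 0 ≤ d.getD q.1 0) := by
    refine hpair.imp_of_mem ?_
    intro p q hp hq hlt
    rw [PySem.Dict.getD_of_mem_items d (by simpa using hp) hnd, PySem.Dict.getD_of_mem_items d (by simpa using hq) hnd]
    omega
  simpa [PySem.Dict.keys, List.pairwise_map] using this

-- ===== VERDICT (by name: the statement is the Claim_ definition above) =====
theorem get_attack_hint_spec : Claim_equal_get_attack_hint := by
  intro num_list _
  unfold Spec_get_attack_hint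
  rw [pvA_eq, pvB_eq]
  have h0 : pvInv [] PySem.Dict.empty 0 := by
    refine ⟨by simp [PySem.Dict.keys, PySem.Dict.empty], ?_, ?_, ?_, by simp [PySem.Dict.empty]⟩ <;>
      simp [PySem.Dict.empty]
  have h := pvLoop_inv num_list [] PySem.Dict.empty 0 h0
  simp only []
  rw [pvSorted_keys h]
  obtain ⟨_, _, _, _, hres⟩ := h
  rw [hres]
  simp [PySem.Dict.keys, List.map_map]
  rfl
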